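-- pv_equiv track=rewrite | github.com/MaticTonin/Faks-FMF | 2 LETNIK/Programiranje/Funkcije/matrikeprava.py | uporabi
-- ===== SOURCE A (Python) =====
-- def uporabi(mat, v):
--     m=len(mat) #stolpec
--     n=len(mat[0]) #vrsta
--     u=[] #vektor, v katerega slikam
--     for i in range(m): #najprej m, zaradi vrste 73
--         vsota=0 #definiram tabelco vsot, ki so v slikanem vektorju
--         for j in range(n): #grem mnozit koponento vektorja z vsako podmatriko
--             vsota+= mat[i][j] * v[j]
--         u.append(vsota) # z sprehajanjem po u slikam vanj vsote
--     return u
-- ===== SOURCE B (Python) =====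
-- def uporabi(mat, v):
--     n = len(mat[0])
--     u = [0] * len(mat)
--     for j, vj in enumerate(v[:n]):
--         u = [ui + row[j] * vj for ui, row in zip(u, mat)]
--     return u
-- ===== Notes on version B (the rewrite author's own statement) =====
-- stated objective: alternative
-- what changed: Column-oriented accumulation by iteration over enumerate(v[:n]): the whole result vector is rebuilt per column as a zip comprehension u=[ui+row[j]*vj for ui,row in zip(u,mat)], instead of A's per-row dot-product loops with integer index arithmetic.
-- outside the precondition, e.g. on uporabi([], []): A raises IndexError, B raises IndexError; on uporabi([[1, 2]], [5]): A raises IndexError, B returns [5]; on uporabi([[1, 2], [3]], [5, 7]): A raises IndexError, B raises IndexError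
import Mathlib
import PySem

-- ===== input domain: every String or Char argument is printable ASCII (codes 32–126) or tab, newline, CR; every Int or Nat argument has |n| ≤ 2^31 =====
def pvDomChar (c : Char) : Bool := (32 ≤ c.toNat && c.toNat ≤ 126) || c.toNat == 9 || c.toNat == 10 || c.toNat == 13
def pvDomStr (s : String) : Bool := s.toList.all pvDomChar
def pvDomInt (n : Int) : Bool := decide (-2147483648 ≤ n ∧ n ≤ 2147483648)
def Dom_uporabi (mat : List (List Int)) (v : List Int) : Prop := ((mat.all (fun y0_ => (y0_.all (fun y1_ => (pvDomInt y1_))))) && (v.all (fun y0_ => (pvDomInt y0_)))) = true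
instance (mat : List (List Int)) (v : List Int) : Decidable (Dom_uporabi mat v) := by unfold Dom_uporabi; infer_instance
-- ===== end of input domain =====

-- B rebuilds the whole result vector once per column (enumerate + zip comprehension)
-- instead of A's per-row dot products with index loops; same O(m*n) cost, return-value equivalence.

-- ===== PORT A =====
-- Literal port of A: row-by-row dot products, appended to u.
-- pyGetD defaults are never reached under Pre_uporabi (all indices in range; empty mat raises in Python).
def uporabi (mat : List (List Int)) (v : List Int) : List Int :=
  let m : Int := mat.length
  let n : Int := ((PySem.List.pyGet? mat 0).getD []).length
  (PySem.List.pyRange 0 m 1).foldl (fun u i =>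
    u ++ [(PySem.List.pyRange 0 n 1).foldl (fun vsota j =>
      vsota + PySem.List.pyGetD (PySem.List.pyGetD mat i []) j 0 * PySem.List.pyGetD v j 0) 0]) []

-- ===== PORT B =====
-- Literal port of B: u = [0]*len(mat); for j, vj in enumerate(v[:n]):
--   u = [ui + row[j]*vj for ui, row in zip(u, mat)]  (the zip comprehension is List.zipWith).
def uporabi_alt (mat : List (List Int)) (v : List Int) : List Int :=
  let n : Int := ((PySem.List.pyGet? mat 0).getD []).length
  (PySem.List.enumerate (PySem.List.slice v none (some n)) 0).foldl
    (fun u p =>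
      List.zipWith (fun ui row => ui + PySem.List.pyGetD row p.1 0 * p.2) u mat)
    (List.replicate mat.length 0)

-- ===== PRECONDITION & SPEC =====
-- Pre_ excludes exactly the inputs where Python A raises IndexError: empty mat (mat[0]),
-- a row shorter than the first row, or v shorter than the first row.
def Pre_uporabi (mat : List (List Int)) (v : List Int) : Prop :=
  mat ≠ [] ∧ (∀ row ∈ mat, (mat.headD []).length ≤ row.length) ∧ (mat.headD []).length ≤ v.length
instance (mat : List (List Int)) (v : List Int) : Decidable (Pre_uporabi mat v) := by unfold Pre_uporabi; infer_instance

def pvWitness_uporabi : List (List Int) × List Int := ([[1, 2], [3, 4]], [5, 6])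

def Spec_uporabi (mat : List (List Int)) (v : List Int) (out : List Int) : Prop := out = uporabi_alt mat v
instance (mat : List (List Int)) (v : List Int) (out : List Int) : Decidable (Spec_uporabi mat v out) := by unfold Spec_uporabi; infer_instance

-- ===== CLAIM (what is proved, stated in full; the proofs are below) =====
def Claim_equal_uporabi : Prop := ∀ (mat : List (List Int)) (v : List Int), Dom_uporabi mat v → Pre_uporabi mat v → Spec_uporabi mat v (uporabi mat v)

-- ===== LEMMAS AND PROOFS =====

-- zipWith with an ignored right component is the identity on a short-enough left list.
theorem pv_zipWith_fst : ∀ (u : List Int) (mat : List (List Int)), u.length ≤ mat.length →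
    List.zipWith (fun a (_ : List Int) => a) u mat = u := by
  intro u
  induction u with
  | nil => intro mat _; simp
  | cons a u ih =>
    intro mat h
    cases mat with
    | nil => simp at h
    | cons r t => simpa using ih t (by simpa using h)

-- Composing two zipWiths against the same right list.
theorem pv_zipWith_zipWith (f g : Int → List Int → Int) :
    ∀ (u : List Int) (mat : List (List Int)),
      List.zipWith f (List.zipWith g u mat) mat = List.zipWith (fun a b => f (g a b) b) u mat := by
  intro u
  induction u with
  | nil => intro mat; simp
  | cons a u ih =>
    intro mat
    cases mat with
    | nil => simp
    | cons r t => simpa using ih t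

-- zipWith against a replicate left list is a map.
theorem pv_zipWith_replicate (f : Int → List Int → Int) :
    ∀ (mat : List (List Int)), List.zipWith f (List.replicate mat.length 0) mat = mat.map (f 0) := by
  intro mat
  induction mat with
  | nil => simp
  | cons r t ih => simpa [List.replicate_succ] using ih

-- B's column loop: folding the per-column zipWith updates equals one zipWith of row sums.
theorem pv_foldzip (mat : List (List Int)) (g : List Int → Nat → Int) :
    ∀ (l : List Nat) (u : List Int), u.length ≤ mat.length →
      l.foldl (fun u j => List.zipWith (fun a row => a + g row j) u mat) u
        = List.zipWith (fun a row => a + (l.map (g row)).sum) u mat := by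
  intro l
  induction l with
  | nil =>
    intro u h
    simp only [List.foldl_nil, List.map_nil, List.sum_nil, add_zero]
    exact (pv_zipWith_fst u mat h).symm
  | cons j l ih =>
    intro u h
    have hlen : (List.zipWith (fun a row => a + g row j) u mat).length ≤ mat.length := by
      simp
    rw [List.foldl_cons, ih _ hlen, pv_zipWith_zipWith]
    have hf : (fun a row => a + g row j + (l.map (g row)).sum)
        = (fun (a : Int) (row : List Int) => a + ((j :: l).map (g row)).sum) := by
      funext a row; simp; ring
    rw [hf]

-- map over range with getD equals map over the list itself.
theorem pv_map_range_getD (f : List Int → Int) (mat : List (List Int)) :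
    (List.range mat.length).map (fun i => f (mat.getD i [])) = mat.map f := by
  apply List.ext_getElem
  · simp
  · intro i h1 h2
    simp [List.getD_eq_getElem?_getD, List.getElem?_eq_getElem (by simpa using h1)]

-- ===== VERDICT (by name: the statement is the Claim_ definition above) =====
theorem uporabi_spec : Claim_equal_uporabi := by
  intro mat v _ hpre
  obtain ⟨hne, hrows, hv⟩ := hpre
  cases mat with
  | nil => exact absurd rfl hne
  | cons r t =>
  unfold Spec_uporabi uporabi uporabi_alt
  have hhead : (r :: t).headD [] = r := rfl
  rw [hhead] at hrows hv
  set mat := r :: t with hmat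
  have hget0 : ((PySem.List.pyGet? mat 0).getD []) = r := by
    simp [PySem.List.pyGet?, PySem.List.pyIdx?, hmat]
  simp only [hget0]
  set n := r.length with hn
  -- A side
  rw [PySem.List.slice_to_natCast]
  have hwlen : (v.take n).length = n := by simp [hv]
  rw [PySem.List.enumerate_eq_map_pyRange (v.take n) 0, PySem.List.len_eq, hwlen]
  simp only [PySem.List.pyRange_zero_nat, List.foldl_map,
    PySem.List.foldl_append_singleton_eq_map, List.nil_append, PySem.List.pyGetD_natCast]
  -- now both sides are folds/maps over List.range
  rw [pv_foldzip mat (fun row j => row.getD j 0 * (v.take n).getD j 0) (List.range n)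
        (List.replicate mat.length 0) (by simp)]
  rw [pv_zipWith_replicate (fun a row => a + ((List.range n).map
        (fun j => row.getD j 0 * (v.take n).getD j 0)).sum) mat]
  rw [← pv_map_range_getD (fun row => 0 + ((List.range n).map
        (fun j => row.getD j 0 * (v.take n).getD j 0)).sum) mat]
  refine List.map_congr_left (fun i _ => ?_)
  rw [PySem.List.foldl_add, zero_add, zero_add]
  refine congrArg List.sum (List.map_congr_left (fun j hj => ?_))
  have hjn : j < n := List.mem_range.mp hj
  have : (v.take n).getD j 0 = v.getD j 0 := by
    have hjv : j < v.length := lt_of_lt_of_le hjn hv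
    simp [List.getD_eq_getElem?_getD, hjn, List.getElem?_eq_getElem hjv]
  rw [this]
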